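-- pv_equiv track=rewrite | github.com/JamilProg/crosslingual_bert_annotation_projection | src/silver_standard_factory/__init__.py | count_trailing_punctuations
-- ===== SOURCE A (Python) =====
-- import string
--
-- def count_trailing_punctuations(txt) -> int:
--     count = 0
--     for char in reversed(txt):
--         if char in string.punctuation:
--             count += 1
--         else:
--             break
--     return count
-- ===== SOURCE B (Python) =====
-- import string
--
-- def count_trailing_punctuations(txt) -> int:
--     return len(txt) - len(txt.rstrip(string.punctuation))
-- ===== Notes on version B (the rewrite author's own statement) =====
-- stated objective: idiomatic
-- what changed: Replaces the explicit reversed-iteration loop with an early break by a single str.rstrip(string.punctuation) call, deriving the count from the length difference.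
import Mathlib
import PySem

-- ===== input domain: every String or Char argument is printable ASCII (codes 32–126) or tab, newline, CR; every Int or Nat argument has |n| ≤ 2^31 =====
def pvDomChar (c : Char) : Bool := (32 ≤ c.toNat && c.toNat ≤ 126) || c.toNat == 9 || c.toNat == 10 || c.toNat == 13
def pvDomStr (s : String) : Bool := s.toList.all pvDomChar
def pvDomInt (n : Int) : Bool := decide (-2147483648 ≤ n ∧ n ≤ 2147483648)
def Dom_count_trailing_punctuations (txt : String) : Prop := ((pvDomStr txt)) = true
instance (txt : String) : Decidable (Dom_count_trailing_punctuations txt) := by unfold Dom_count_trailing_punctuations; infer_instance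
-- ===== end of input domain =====

-- B replaces A's reversed character loop (with early break) by a single rstrip(punctuation)
-- call and a length difference (objective: idiomatic).


-- string.punctuation
def pvPunct : List Char := "!\"#$%&'()*+,-./:;<=>?@[\\]^_`{|}~".toList

-- ===== PORT A =====
-- the for-loop over reversed(txt) with an early break, carrying the accumulator `count`
def countLoopA (count : Int) : List Char → Int
  | [] => count
  | c :: rest => if pvPunct.contains c then countLoopA (count + 1) rest else count

def count_trailing_punctuations (txt : String) : Int :=
  countLoopA 0 txt.toList.reverse

-- ===== PORT B =====
-- txt.rstrip(string.punctuation): drop trailing chars that are in pvPunct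
-- (ported by hand, exact: CPython's rstrip(chars) removes trailing chars in the set)
def count_trailing_punctuations_alt (txt : String) : Int :=
  let stripped := (txt.toList.reverse.dropWhile (fun c => pvPunct.contains c)).reverse
  (txt.toList.length : Int) - (stripped.length : Int)

-- ===== PRECONDITION & SPEC =====
def Spec_count_trailing_punctuations (txt : String) (out : Int) : Prop := out = count_trailing_punctuations_alt txt
instance (txt : String) (out : Int) : Decidable (Spec_count_trailing_punctuations txt out) := by unfold Spec_count_trailing_punctuations; infer_instance

-- ===== CLAIM (what is proved, stated in full; the proofs are below) =====
def Claim_equal_count_trailing_punctuations : Prop := ∀ (txt : String), Dom_count_trailing_punctuations txt → Spec_count_trailing_punctuations txt (count_trailing_punctuations txt)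

-- ===== LEMMAS AND PROOFS =====

-- A's loop returns the accumulator plus the length of the punctuation prefix of the reversed list
theorem countLoopA_eq (l : List Char) (count : Int) :
    countLoopA count l = count + (l.takeWhile (fun c => pvPunct.contains c)).length := by
  induction l generalizing count with
  | nil => simp [countLoopA]
  | cons c rest ih =>
    by_cases h : c ∈ pvPunct
    · simp [countLoopA, List.takeWhile, h, ih]; ring
    · simp [countLoopA, List.takeWhile, h]

-- ===== VERDICT (by name: the statement is the Claim_ definition above) =====
theorem count_trailing_punctuations_spec : Claim_equal_count_trailing_punctuations := by
  intro txt _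
  unfold Spec_count_trailing_punctuations count_trailing_punctuations count_trailing_punctuations_alt
  rw [countLoopA_eq]
  have h : (txt.toList.reverse.takeWhile (fun c => pvPunct.contains c)).length
      + (txt.toList.reverse.dropWhile (fun c => pvPunct.contains c)).length
      = txt.toList.length := by
    rw [← List.length_append, List.takeWhile_append_dropWhile, List.length_reverse]
  simp only [List.length_reverse]
  omega
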